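-- pv_equiv track=rewrite | github.com/Juunsik/Algorithm_Kata | Lv11/262.py | solution
-- ===== SOURCE A (Python) =====
-- def solution(s):
--     stk=[]
--     for i in s:
--         stk.append(i)
--         if len(stk)>=2:
--             if stk[-1]==stk[-2]:
--                 stk.pop()
--                 stk.pop()
--
--     return 0 if stk else 1
-- ===== SOURCE B (Python) =====
-- import re
--
-- def solution(s):
--     prev = None
--     while s != prev:
--         prev = s
--         s = re.sub(r'(.)\1', '', s, flags=re.DOTALL)
--     return 1 if s == '' else 0
-- ===== Notes on version B (the rewrite author's own statement) =====
-- stated objective: alternative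
-- what changed: Replaces the single left-to-right stack scan with a fixpoint loop that repeatedly deletes all non-overlapping adjacent equal pairs (re.sub '(.)\1' with DOTALL) until the string stabilizes; correctness rests on confluence of pair cancellation.
import Mathlib
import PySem

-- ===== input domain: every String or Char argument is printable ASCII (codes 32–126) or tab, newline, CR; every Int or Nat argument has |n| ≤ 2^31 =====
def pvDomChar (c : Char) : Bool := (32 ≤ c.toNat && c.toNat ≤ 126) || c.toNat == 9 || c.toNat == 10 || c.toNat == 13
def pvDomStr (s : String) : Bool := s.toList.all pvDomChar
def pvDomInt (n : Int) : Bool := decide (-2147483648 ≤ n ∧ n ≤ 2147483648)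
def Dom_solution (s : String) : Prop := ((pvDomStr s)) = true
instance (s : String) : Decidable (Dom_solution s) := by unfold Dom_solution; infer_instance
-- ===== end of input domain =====

-- B replaces A's single stack scan by a fixpoint loop removing all non-overlapping
-- adjacent equal pairs in global passes until the string stabilizes (objective: alternative).

-- ===== PORT A =====
-- literal transliteration of A's loop: append, then if the last two elements are
-- equal pop twice (stk.pop() on the last element = dropLast, guarded by len >= 2)
def solution (s : String) : Int :=
  let stk := s.toList.foldl (fun stk i =>
    let stk := stk ++ [i]
    if 2 ≤ stk.length then
      if PySem.List.pyGet? stk (-1) = PySem.List.pyGet? stk (-2) then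
        (stk.dropLast).dropLast
      else stk
    else stk) ([] : List Char)
  if stk ≠ [] then 0 else 1

-- ===== PORT B =====
-- one global pass of re.sub(r'(.)\1', '', s, flags=re.DOTALL): delete
-- non-overlapping adjacent equal pairs, scanning left to right
def opPass : List Char → List Char
  | [] => []
  | [c] => [c]
  | c1 :: c2 :: t => if c1 = c2 then opPass t else c1 :: opPass (c2 :: t)

theorem opPass_length_le (l : List Char) : (opPass l).length ≤ l.length := by
  induction l using opPass.induct with
  | case1 => simp [opPass]
  | case2 c => simp [opPass]
  | case3 c t ih => rw [opPass, if_pos rfl]; simp; omega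
  | case4 c1 c2 t hne ih => rw [opPass, if_neg hne]; simp at ih ⊢; omega

theorem opPass_length_lt (l : List Char) (h : opPass l ≠ l) :
    (opPass l).length < l.length := by
  induction l using opPass.induct with
  | case1 => simp [opPass] at h
  | case2 c => simp [opPass] at h
  | case3 c t ih =>
      have := opPass_length_le t
      simp [opPass]; omega
  | case4 c1 c2 t hne ih =>
      rw [opPass, if_neg hne] at h ⊢
      have h2 : opPass (c2 :: t) ≠ c2 :: t := fun e => h (by rw [e])
      have := ih h2
      simp at this ⊢; omega

-- the while loop: apply opPass until the string stops changing
def fixPass (l : List Char) : List Char :=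
  if h : opPass l = l then l else fixPass (opPass l)
termination_by l.length
decreasing_by exact opPass_length_lt l h

def solution_alt (s : String) : Int :=
  let r := fixPass s.toList
  if r = [] then 1 else 0

-- ===== PRECONDITION & SPEC =====
def Spec_solution (s : String) (out : Int) : Prop := out = solution_alt s
instance (s : String) (out : Int) : Decidable (Spec_solution s out) := by unfold Spec_solution; infer_instance

-- ===== CLAIM (what is proved, stated in full; the proofs are below) =====
def Claim_equal_solution : Prop := ∀ (s : String), Dom_solution s → Spec_solution s (solution s)

-- ===== LEMMAS AND PROOFS =====

-- the canonical stack step (push unless it cancels with the top) and its fold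
def stkStep (st : List Char) (c : Char) : List Char :=
  if st.head? = some c then st.tail else c :: st

def red (st l : List Char) : List Char := l.foldl stkStep st

-- A's loop body, on a reversed stack, is exactly stkStep
theorem astep_rev (st : List Char) (c : Char) :
    (let stk := st.reverse ++ [c]
     if 2 ≤ stk.length then
       if PySem.List.pyGet? stk (-1) = PySem.List.pyGet? stk (-2) then
         (stk.dropLast).dropLast
       else stk
     else stk) = (stkStep st c).reverse := by
  cases st with
  | nil => simp [stkStep]
  | cons a st' =>
      have hlen : 2 ≤ ((a :: st').reverse ++ [c]).length := by simp
      have h1 : PySem.List.pyGet? ((a :: st').reverse ++ [c]) (-1) = some c :=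
        PySem.List.pyGet?_neg_one_append_singleton _ _
      have hsplit : (a :: st').reverse ++ [c] = st'.reverse ++ [a, c] := by simp
      have h2 : PySem.List.pyGet? ((a :: st').reverse ++ [c]) (-2) = some a := by
        rw [PySem.List.pyGet?_neg_ofNat _ 2 (by omega) (by simpa using hlen)]
        rw [hsplit]
        have hl : (st'.reverse ++ [a, c]).length - 2 = st'.reverse.length := by simp
        rw [hl, List.getElem?_append_right (by omega)]
        simp
      simp only [hlen, if_pos, h1, h2]
      by_cases hc : c = a
      · subst hc
        simp [stkStep, hsplit, List.dropLast_append_of_ne_nil]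
      · have hne : ¬ (some c = some a) := by simpa using hc
        simp [stkStep, hne, Ne.symm hc]

theorem afold_rev (l st : List Char) :
    l.foldl (fun stk i =>
      let stk := stk ++ [i]
      if 2 ≤ stk.length then
        if PySem.List.pyGet? stk (-1) = PySem.List.pyGet? stk (-2) then
          (stk.dropLast).dropLast
        else stk
      else stk) st.reverse = (red st l).reverse := by
  induction l generalizing st with
  | nil => simp [red]
  | cons c l ih =>
      simp only [List.foldl_cons]
      rw [astep_rev st c]
      exact ih (stkStep st c)

-- stkStep preserves "no two adjacent equal"
theorem stkStep_chain (st : List Char) (c : Char) (h : List.IsChain (· ≠ ·) st) :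
    List.IsChain (· ≠ ·) (stkStep st c) := by
  unfold stkStep
  split_ifs with hh
  · exact h.tail
  · refine List.isChain_cons.mpr ⟨?_, h⟩
    intro y hy he
    exact hh (by simpa [he] using hy)

-- removing one adjacent equal pair anywhere does not change the fold (on a reduced stack)
theorem red_cancel (u : List Char) (c : Char) (v st : List Char)
    (h : List.IsChain (· ≠ ·) st) :
    red st (u ++ c :: c :: v) = red st (u ++ v) := by
  induction u generalizing st with
  | nil =>
      simp only [List.nil_append, red, List.foldl_cons]
      cases st with
      | nil => simp [stkStep]
      | cons a st' =>
          by_cases hac : a = c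
          · subst hac
            have hne : st'.head? ≠ some a := by
              cases st' with
              | nil => simp
              | cons b t =>
                  have := (List.isChain_cons.mp h).1 b (by simp)
                  simpa using fun e => this e.symm
            simp [stkStep, hne]
          · have hh : ¬ ((a :: st').head? = some c) := by
              simpa using fun e => hac e
            have e1 : stkStep (a :: st') c = c :: a :: st' := by
              rw [stkStep, if_neg hh]
            have e2 : stkStep (c :: a :: st') c = a :: st' := by
              rw [stkStep, if_pos (show (c :: a :: st').head? = some c from rfl)]
              rfl
            rw [e1, e2]
  | cons a u ih =>
      simp only [List.cons_append, red, List.foldl_cons]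
      exact ih (stkStep st a) (stkStep_chain st a h)

-- one global pass does not change the fold
theorem red_opPass (l : List Char) : ∀ st, List.IsChain (· ≠ ·) st →
    red st (opPass l) = red st l := by
  induction l using opPass.induct with
  | case1 => intro st _; simp [opPass]
  | case2 c => intro st _; simp [opPass]
  | case3 c t ih =>
      intro st h
      rw [opPass, if_pos rfl, ih st h]
      exact (red_cancel [] c t st h).symm
  | case4 c1 c2 t he ih =>
      intro st h
      rw [opPass, if_neg he]
      simp only [red, List.foldl_cons]
      exact ih (stkStep st c1) (stkStep_chain st c1 h)

-- hence the whole fixpoint loop does not change the fold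
theorem red_fixPass (l : List Char) : red [] (fixPass l) = red [] l := by
  induction l using fixPass.induct with
  | case1 l h => rw [fixPass, dif_pos h]
  | case2 l h ih =>
      rw [fixPass, dif_neg h, ih, red_opPass l [] (by simp)]

theorem fixPass_fix (l : List Char) : opPass (fixPass l) = fixPass l := by
  induction l using fixPass.induct with
  | case1 l h => rw [fixPass, dif_pos h]; exact h
  | case2 l h ih => rw [fixPass, dif_neg h]; exact ih

theorem chain_of_opPass_eq (l : List Char) (h : opPass l = l) :
    List.IsChain (· ≠ ·) l := by
  induction l using opPass.induct with
  | case1 => simp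
  | case2 c => simp
  | case3 c t ih =>
      exfalso
      have hle := opPass_length_le t
      rw [opPass, if_pos rfl] at h
      have := congrArg List.length h
      simp at this; omega
  | case4 c1 c2 t he ih =>
      rw [opPass, if_neg he] at h
      have h' : opPass (c2 :: t) = c2 :: t := by injection h
      refine List.isChain_cons.mpr ⟨?_, ih h'⟩
      intro y hy e
      simp at hy
      exact he (e.trans hy.symm)

-- on a string with no adjacent equal pair, the stack fold just reverses it
theorem red_chain_aux (r : List Char) : ∀ st : List Char, List.IsChain (· ≠ ·) r →
    (∀ c, r.head? = some c → st.head? ≠ some c) →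
    red st r = r.reverse ++ st := by
  induction r with
  | nil => intro st _ _; simp [red]
  | cons c r ih =>
      intro st hch hhd
      simp only [red, List.foldl_cons]
      have hne : st.head? ≠ some c := hhd c (by simp)
      have hs : stkStep st c = c :: st := by simp [stkStep, hne]
      rw [hs]
      have := ih (c :: st) (List.isChain_cons.mp hch).2 ?_
      · simpa [red] using this
      · intro d hd
        have := (List.isChain_cons.mp hch).1 d (by simp [hd])
        simpa using fun e => this e

theorem red_nil_eq (l : List Char) : red [] l = (fixPass l).reverse := by
  rw [← red_fixPass]
  rw [red_chain_aux (fixPass l) [] (chain_of_opPass_eq _ (fixPass_fix l)) (by simp)]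
  simp

-- ===== VERDICT (by name: the statement is the Claim_ definition above) =====
theorem solution_spec : Claim_equal_solution := by
  intro s _
  unfold Spec_solution solution solution_alt
  have h := afold_rev s.toList []
  simp only [List.reverse_nil] at h
  rw [h, red_nil_eq]
  by_cases hf : fixPass s.toList = []
  · simp [hf]
  · simp [hf]
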